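-- pv_equiv track=rewrite | github.com/Kanika-Sodhi/All_Practice | allpractice/testing.py | kth_frequency
-- ===== SOURCE A (Python) =====
-- def kth_frequency(lst, k):
--     dct = {}
--     ls = []
--     for i in lst:
--         if dct is None:
--             dct[i] = 1
--         else:
--             dct[i] = dct.get(i, 0) + 1
--
--     for key, value in dct.items():
--         if value == k:
--             ls.append([key, value])
--     return ls
-- ===== SOURCE B (Python) =====
-- def kth_frequency(lst, k):
--     # Partition-consumption: repeatedly split the remaining list by its first
--     # element; the list shrinks until empty, no frequency table is built.
--     out = []
--     rem = lst
--     while rem: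
--         x = rem[0]
--         same = [y for y in rem if y == x]
--         rem = [y for y in rem if y != x]
--         if len(same) == k:
--             out.append([x, len(same)])
--     return out
-- ===== Notes on version B (the rewrite author's own statement) =====
-- stated objective: alternative
-- what changed: Replaces the frequency-dictionary build plus items pass with a quicksort-style partition loop: repeatedly split the remaining list on its first element, emit [x, len(same)] when the partition size equals k, and continue on the residue; the list itself shrinks to empty and no count table or set is maintained.
import Mathlib
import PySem

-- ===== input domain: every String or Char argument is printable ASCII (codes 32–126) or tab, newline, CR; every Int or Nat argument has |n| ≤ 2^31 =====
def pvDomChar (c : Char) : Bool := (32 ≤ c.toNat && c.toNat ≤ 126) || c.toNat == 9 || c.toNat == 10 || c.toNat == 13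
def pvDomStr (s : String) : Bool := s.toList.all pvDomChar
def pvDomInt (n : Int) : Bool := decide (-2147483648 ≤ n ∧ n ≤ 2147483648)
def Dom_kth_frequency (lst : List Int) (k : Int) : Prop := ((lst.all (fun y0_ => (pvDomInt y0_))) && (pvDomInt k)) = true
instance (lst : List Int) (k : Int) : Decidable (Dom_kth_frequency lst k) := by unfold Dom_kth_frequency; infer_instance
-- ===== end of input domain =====

-- B replaces A's frequency-dictionary build + items pass with a partition-consumption
-- loop: split the remaining list on its first element, emit when the partition size is k,
-- recurse on the residue (alternative decomposition; no count table or set is kept).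


-- ===== PORT A =====
-- 'if dct is None' is always false (dct is a dict literal), so only the else-branch runs.
def kth_frequency (lst : List Int) (k : Int) : List (List Int) :=
  (lst.foldl (fun (d : PySem.Dict Int Int) i => d.insert i (d.getD i 0 + 1))
    PySem.Dict.empty).items.foldl
      (fun ls p => if p.2 == k then ls ++ [[p.1, p.2]] else ls) []

-- ===== PORT B =====
-- the 'while rem:' loop of Source B: partition rem on its first element, shrink rem
def kthAltLoop (rem : List Int) (k : Int) (out : List (List Int)) : List (List Int) :=
  match rem with
  | [] => out
  | x :: xs =>
    kthAltLoop ((x :: xs).filter (fun y => !(y == x))) k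
      (if ((((x :: xs).filter (fun y => y == x)).length : Int) == k) then
        out ++ [[x, (((x :: xs).filter (fun y => y == x)).length : Int)]] else out)
termination_by rem.length
decreasing_by
  simp only [List.filter_cons, beq_self_eq_true, Bool.not_true]
  exact Nat.lt_succ_of_le (List.length_filter_le _ _)

def kth_frequency_alt (lst : List Int) (k : Int) : List (List Int) :=
  kthAltLoop lst k []

-- ===== PRECONDITION & SPEC =====
def Spec_kth_frequency (lst : List Int) (k : Int) (out : List (List Int)) : Prop := out = kth_frequency_alt lst k
instance (lst : List Int) (k : Int) (out : List (List Int)) : Decidable (Spec_kth_frequency lst k out) := by unfold Spec_kth_frequency; infer_instance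

-- ===== CLAIM (what is proved, stated in full; the proofs are below) =====
def Claim_equal_kth_frequency : Prop := ∀ (lst : List Int) (k : Int), Dom_kth_frequency lst k → Spec_kth_frequency lst k (kth_frequency lst k)

-- ===== LEMMAS AND PROOFS =====

-- filtering by q commutes away a discard of an element q rejects
theorem pv_filter_discard {x : Int} (q : Int → Bool) (h : q x = false) :
    ∀ (A : List Int), (A.filter (fun y => !(y == x))).filter q = A.filter q := by
  intro A
  induction A with
  | nil => rfl
  | cons a A ih =>
    by_cases hax : a = x
    · subst hax; simp [h, ih]
    · simp [List.filter_cons, hax, ih]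

-- set(filter) = filter(set): dedup-first-occurrence commutes with an element-wise filter
theorem pv_ofList_filter (q : Int → Bool) :
    ∀ (A : List Int), PySem.Set.ofList (A.filter q) = (PySem.Set.ofList A).filter q := by
  intro A
  induction A with
  | nil => rfl
  | cons a A ih =>
    rw [PySem.Set.ofList_cons]
    by_cases hq : q a
    · simp only [List.filter_cons, hq, reduceIte, PySem.Set.ofList_cons, ih,
        PySem.Set.discard, List.filter_filter]
      congr 1
      apply List.filter_congr
      intro y _; rw [Bool.and_comm]
    · simp only [List.filter_cons, hq, Bool.false_eq_true, reduceIte, ih,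
        PySem.Set.discard]
      rw [pv_filter_discard q (by simpa using hq)]

-- counting an element ≠ x is unchanged by removing the x's
theorem pv_count_filter_ne (y x : Int) (h : y ≠ x) :
    ∀ (A : List Int), List.count y (A.filter (fun z => !(z == x))) = List.count y A := by
  intro A
  induction A with
  | nil => rfl
  | cons a A ih =>
    rw [List.filter_cons]
    by_cases hax : a = x
    · subst hax
      simp [Ne.symm h, ih]
    · simp [hax, List.count_cons, ih]

-- List.count as the length of the equal-partition
theorem pv_count_eq_filter_length (x : Int) (A : List Int) :
    List.count x A = (A.filter (fun y => y == x)).length := by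
  rw [List.count, List.countP_eq_length_filter]

-- B's loop computes out ++ (the k-frequency rows of rem in first-appearance order)
theorem pv_loop (k : Int) :
    ∀ (n : Nat) (rem : List Int) (out : List (List Int)), rem.length ≤ n →
    kthAltLoop rem k out
      = out ++ ((PySem.Set.ofList rem).filter
              (fun y => ((List.count y rem : Int) == k))).map
              (fun y => [y, (List.count y rem : Int)]) := by
  intro n
  induction n with
  | zero =>
    intro rem out h
    have : rem = [] := List.eq_nil_of_length_eq_zero (Nat.le_zero.mp h)
    subst this; rw [kthAltLoop.eq_def]; simp
  | succ n ih =>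
    intro rem out h
    match rem with
    | [] => rw [kthAltLoop.eq_def]; simp
    | x :: xs =>
      rw [kthAltLoop.eq_def]
      simp only []
      have hrest : ((x :: xs).filter (fun y => !(y == x))) = xs.filter (fun y => !(y == x)) := by
        simp
      have hlen : (xs.filter (fun y => !(y == x))).length ≤ n := by
        exact le_trans (List.length_filter_le _ _) (Nat.succ_le_succ_iff.mp h)
      rw [hrest, ih _ _ hlen]
      -- identify set(rest) with discard (set xs) x
      have hset : PySem.Set.ofList (xs.filter (fun y => !(y == x)))
          = PySem.Set.discard (PySem.Set.ofList xs) x := by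
        rw [pv_ofList_filter]; rfl
      rw [hset, PySem.Set.ofList_cons]
      -- the head contribution
      rw [List.filter_cons]
      have hcx : List.count x (x :: xs) = ((x :: xs).filter (fun y => y == x)).length :=
        pv_count_eq_filter_length x (x :: xs)
      -- tail: counts over rest = counts over rem for every y ≠ x
      have hcnt : ∀ y ∈ (PySem.Set.ofList xs).discard x,
          List.count y (xs.filter (fun z => !(z == x))) = List.count y (x :: xs) := by
        intro y hy
        have hyx : y ≠ x := ((PySem.Set.mem_discard _ _ _).mp hy).2
        rw [pv_count_filter_ne y x hyx, List.count_cons]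
        simp [Ne.symm hyx]
      have hfil :
          List.filter (fun y => ((List.count y (xs.filter (fun z => !(z == x))) : Int) == k))
              ((PySem.Set.ofList xs).discard x)
            = List.filter (fun y => ((List.count y (x :: xs) : Int) == k))
              ((PySem.Set.ofList xs).discard x) :=
        List.filter_congr (fun y hy => by rw [hcnt y hy])
      have hmap :
          List.map (fun y => ([y, (List.count y (xs.filter (fun z => !(z == x))) : Int)] : List Int))
              (List.filter (fun y => ((List.count y (x :: xs) : Int) == k))
                ((PySem.Set.ofList xs).discard x))
            = List.map (fun y => [y, (List.count y (x :: xs) : Int)])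
              (List.filter (fun y => ((List.count y (x :: xs) : Int) == k))
                ((PySem.Set.ofList xs).discard x)) :=
        List.map_congr_left (fun y hy => by rw [hcnt y (List.mem_of_mem_filter hy)])
      rw [hfil, hmap]
      simp only [List.filter_cons, beq_self_eq_true, reduceIte, List.length_cons] at hcx
      simp only [beq_self_eq_true, reduceIte, List.length_cons]
      have hkey : ((((xs.filter (fun y => y == x)).length + 1 : Nat) : Int)) = (List.count x (x :: xs) : Int) := by
        rw [hcx]
      rw [hkey]
      by_cases hb : ((List.count x (x :: xs) : Int) == k) = true
      · have hb2 : ((List.count x xs : Int) + 1) = k := by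
          have h' : (List.count x (x :: xs) : Int) = k := by exact_mod_cast beq_iff_eq.mp hb
          rw [List.count_cons_self] at h'; push_cast at h'; omega
        simp [hb2]
      · have hb2 : ¬ ((List.count x xs : Int) + 1 = k) := by
          intro hc
          apply hb
          rw [beq_iff_eq, List.count_cons_self]
          push_cast
          omega
        simp [hb2]

-- ===== VERDICT (by name: the statement is the Claim_ definition above) =====
theorem kth_frequency_spec : Claim_equal_kth_frequency := by
  intro lst k _
  unfold Spec_kth_frequency kth_frequency kth_frequency_alt
  rw [PySem.Dict.foldl_insert_getD_add_one_eq_counter, PySem.Dict.items_counter,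
      PySem.List.foldl_append_if, pv_loop k lst.length lst [] le_rfl]
  rw [List.filter_map, List.map_map]
  rfl
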